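-- pv_equiv track=rewrite | github.com/adhikya28/pythondsa | maxheap.py | nth_max
-- ===== SOURCE A (Python) =====
-- import heapq
--
-- def nth_max(arr,n):
--     arr=[-d for d in arr]
--     heapq.heapify(arr)
--     i=0
--     while i<n:
--         d=heapq.heappop(arr)
--         i+=1
--     return -d
-- ===== SOURCE B (Python) =====
-- def nth_max(arr, n):
--     # nth largest = nth from the end of the ascending sort
--     return sorted(arr)[-n]
-- ===== Notes on version B (the rewrite author's own statement) =====
-- stated objective: faster
-- what changed: A negates the list, heapifies it and pops the min n times in a Python-level while loop; B sorts once ascending and indexes the nth element from the end.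
import Mathlib
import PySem

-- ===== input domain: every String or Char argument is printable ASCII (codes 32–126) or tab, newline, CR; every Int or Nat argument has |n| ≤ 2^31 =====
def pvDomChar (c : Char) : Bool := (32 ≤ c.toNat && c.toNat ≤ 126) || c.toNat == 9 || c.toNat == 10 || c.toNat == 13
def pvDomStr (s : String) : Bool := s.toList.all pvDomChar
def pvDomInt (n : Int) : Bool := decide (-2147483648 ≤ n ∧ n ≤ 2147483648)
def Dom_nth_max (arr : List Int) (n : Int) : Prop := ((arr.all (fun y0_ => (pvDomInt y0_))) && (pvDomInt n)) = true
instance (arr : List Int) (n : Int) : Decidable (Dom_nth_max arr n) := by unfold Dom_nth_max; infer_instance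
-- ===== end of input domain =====

-- B replaces A's negate+heapify+n-pops by one ascending sort indexed from the end (simpler, same result).


-- ===== PORT A =====
-- heapq is modelled by its observable semantics: heapify permutes the list in place
-- (contents unchanged, so a no-op on the multiset of values), and heappop removes and
-- returns the minimum element (exact: the returned VALUE is the minimum; which of
-- several equal copies is removed is unobservable). heappop on [] raises IndexError
-- in Python; the (0, []) branch is unreachable under Pre_.
def pyHeappop (l : List Int) : Int × List Int :=
  match l.min? with
  | some m => (m, l.erase m)
  | none => (0, [])

-- the 'while i < n' loop; d = 0 stands for Python's initially unbound d (n ≤ 0 is outside Pre_)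
def heapWhile (n : Int) (l : List Int) (i d : Int) : Int :=
  if _h : i < n then
    let p := pyHeappop l
    heapWhile n p.2 (i + 1) p.1
  else d
termination_by (n - i).toNat
decreasing_by omega

def nth_max (arr : List Int) (n : Int) : Int :=
  -(heapWhile n (arr.map (fun d => -d)) 0 0)

-- ===== PORT B =====
-- sorted(arr)[-n]; .getD 0 totalizes the IndexError case, which Pre_ excludes
def nth_max_alt (arr : List Int) (n : Int) : Int :=
  (PySem.List.pyGet? (PySem.List.sorted arr (fun x => x) false) (-n)).getD 0

-- ===== PRECONDITION & SPEC =====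
-- Pre_ excludes exactly the inputs where A raises: n ≤ 0 (d is never bound → UnboundLocalError)
-- and n > len(arr) (heappop on an empty heap → IndexError).
def Pre_nth_max (arr : List Int) (n : Int) : Prop := 1 ≤ n ∧ n ≤ arr.length
instance (arr : List Int) (n : Int) : Decidable (Pre_nth_max arr n) := by unfold Pre_nth_max; infer_instance
def pvWitness_nth_max : List Int × Int := ([3, 1, 4, 1, 5], 2)
def Spec_nth_max (arr : List Int) (n : Int) (out : Int) : Prop := out = nth_max_alt arr n
instance (arr : List Int) (n : Int) (out : Int) : Decidable (Spec_nth_max arr n out) := by unfold Spec_nth_max; infer_instance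

-- ===== CLAIM (what is proved, stated in full; the proofs are below) =====
def Claim_equal_nth_max : Prop := ∀ (arr : List Int) (n : Int), Dom_nth_max arr n → Pre_nth_max arr n → Spec_nth_max arr n (nth_max arr n)

-- ===== LEMMAS AND PROOFS =====

-- the ascending sort of l is (min l) followed by the ascending sort of l with that min removed
theorem sorted_cons_min (l : List Int) (m : Int) (hm : l.min? = some m) :
    PySem.List.sorted l (fun x => x) false = m :: PySem.List.sorted (l.erase m) (fun x => x) false := by
  apply PySem.List.sorted_id_eq_of_perm_of_pairwise
  · exact ((PySem.List.sorted_perm _ _ _).cons m).trans (List.perm_cons_erase (List.min?_mem hm)).symm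
  · refine List.Pairwise.cons ?_ (PySem.List.sorted_pairwise _ _)
    intro y hy
    exact (List.min?_eq_some_iff.mp hm).2 y (l.erase_subset ((PySem.List.mem_sorted _ _ _ _).mp hy))

-- the A-side loop returns the k-th smallest element, k = n - i - 1
theorem heapWhile_eq (n : Int) : ∀ (k : Nat) (l : List Int) (i d : Int),
    n = i + k + 1 → k + 1 ≤ l.length →
    heapWhile n l i d = (PySem.List.sorted l (fun x => x) false).getD k 0 := by
  intro k
  induction k with
  | zero =>
    intro l i d hn hlen
    obtain ⟨m, hm⟩ : ∃ m, l.min? = some m := by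
      cases h : l.min? with
      | none => rw [List.min?_eq_none_iff] at h; simp [h] at hlen
      | some m => exact ⟨m, rfl⟩
    rw [heapWhile]
    simp only [pyHeappop, hm]
    rw [dif_pos (by omega : i < n), heapWhile, dif_neg (by omega : ¬ i + 1 < n), sorted_cons_min l m hm]
    simp
  | succ k ih =>
    intro l i d hn hlen
    obtain ⟨m, hm⟩ : ∃ m, l.min? = some m := by
      cases h : l.min? with
      | none => rw [List.min?_eq_none_iff] at h; simp [h] at hlen
      | some m => exact ⟨m, rfl⟩
    rw [heapWhile]
    simp only [pyHeappop, hm]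
    rw [dif_pos (by omega : i < n)]
    rw [ih (l.erase m) (i + 1) m (by omega)
      (by have := l.length_erase_of_mem (List.min?_mem hm); omega)]
    rw [sorted_cons_min l m hm]
    simp

-- ascending sort of the negated list is the reversed negation of the ascending sort
theorem sorted_neg (arr : List Int) :
    PySem.List.sorted (arr.map (fun d => -d)) (fun x => x) false
      = ((PySem.List.sorted arr (fun x => x) false).map (fun d => -d)).reverse := by
  apply PySem.List.sorted_id_eq_of_perm_of_pairwise
  · exact (List.reverse_perm _).trans ((PySem.List.sorted_perm _ _ _).map _)
  · rw [List.pairwise_reverse, List.pairwise_map]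
    exact (PySem.List.sorted_pairwise arr (fun x => x)).imp (by intro a b h; simpa)

-- ===== VERDICT (by name: the statement is the Claim_ definition above) =====
theorem nth_max_spec : Claim_equal_nth_max := by
  intro arr n _ hpre
  obtain ⟨h1, h2⟩ := hpre
  unfold Spec_nth_max nth_max nth_max_alt
  set S := PySem.List.sorted arr (fun x => x) false with hS
  have hSlen : S.length = arr.length := PySem.List.length_sorted _ _ _
  have hk : n = (0 : Int) + ((n - 1).toNat : Nat) + 1 := by omega
  rw [heapWhile_eq n (n - 1).toNat _ 0 0 hk (by simp; omega)]
  rw [sorted_neg arr, ← hS]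
  have hn' : (-n) = -((n.toNat : Nat) : Int) := by omega
  rw [hn', PySem.List.pyGet?_neg_natCast S n.toNat (by omega) (by omega)]
  have hlt : (n - 1).toNat < ((S.map (fun d => -d)).reverse).length := by simp [hSlen]; omega
  rw [List.getD_eq_getElem _ _ hlt, List.getElem_reverse, List.getElem_map,
    List.getElem?_eq_getElem (by omega : S.length - n.toNat < S.length)]
  simp only [neg_neg, Option.getD_some]
  congr 1
  simp
  omega
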